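-- pv_equiv track=rewrite | github.com/1r0nw1ll/quantum-arithmetic-research | demos/rule30_understanding_demo.py | get_center_sequence
-- ===== SOURCE A (Python) =====
-- RULE_30 = {
--     (1, 1, 1): 0,
--     (1, 1, 0): 0,
--     (1, 0, 1): 0,
--     (1, 0, 0): 1,
--     (0, 1, 1): 1,
--     (0, 1, 0): 1,
--     (0, 0, 1): 1,
--     (0, 0, 0): 0,
-- }
--
-- def evolve_rule30(row: list[int]) -> list[int]:
--     """Apply Rule 30 to a row. This is PREDICTION - trivial, O(n)."""
--     n = len(row)
--     new_row = [0] * n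
--     for i in range(n):
--         left = row[(i - 1) % n]
--         center = row[i]
--         right = row[(i + 1) % n]
--         new_row[i] = RULE_30[(left, center, right)]
--     return new_row
--
-- def get_center_sequence(width: int, steps: int) -> list[int]:
--     """Generate the center column sequence."""
--     row = [0] * width
--     row[width // 2] = 1  # Single seed
--
--     center = width // 2
--     sequence = [row[center]]
--
--     for _ in range(steps - 1):
--         row = evolve_rule30(row)
--         sequence.append(row[center])
--
--     return sequence
-- ===== SOURCE B (Python) =====
-- def get_center_sequence(width: int, steps: int) -> list[int]:
--     """Generate the center column sequence (Rule 30 via bitmask: new = left ^ (row | right))."""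
--     c = width // 2
--     mask = (1 << width) - 1
--     row = 1 << c
--     sequence = [(row >> c) & 1]
--     for _ in range(steps - 1):
--         left = ((row << 1) | (row >> (width - 1))) & mask
--         right = ((row >> 1) | ((row & 1) << (width - 1))) & mask
--         row = left ^ (row | right)
--         sequence.append((row >> c) & 1)
--     return sequence
-- ===== Notes on version B (the rewrite author's own statement) =====
-- stated objective: faster
-- what changed: Replaces the per-cell list scan with a single-integer bitboard: the whole row is one Python int and each Rule 30 step is computed for all cells at once as left ^ (row | right) using masked cyclic shifts, with the center bit read by a shift-and-mask.
import Mathlib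
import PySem

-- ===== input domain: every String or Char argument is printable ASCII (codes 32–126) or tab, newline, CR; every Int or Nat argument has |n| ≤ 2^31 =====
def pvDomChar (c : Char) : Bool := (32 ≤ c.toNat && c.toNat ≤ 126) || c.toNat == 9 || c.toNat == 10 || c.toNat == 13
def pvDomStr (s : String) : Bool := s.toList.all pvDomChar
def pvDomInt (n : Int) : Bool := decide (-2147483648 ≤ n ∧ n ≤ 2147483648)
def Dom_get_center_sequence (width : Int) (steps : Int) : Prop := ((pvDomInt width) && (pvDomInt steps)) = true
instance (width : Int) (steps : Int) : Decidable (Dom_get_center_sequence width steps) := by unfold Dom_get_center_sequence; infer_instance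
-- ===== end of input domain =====

-- B replaces A's per-cell list scan by a single-integer bitboard (one Rule 30 step = masked
-- cyclic shifts combined as left ^ (row | right)); equivalence is about the return value.

-- ===== PORT A =====
def RULE_30 : PySem.Dict (Int × Int × Int) Int :=
  PySem.Dict.ofList
    [((1, 1, 1), 0), ((1, 1, 0), 0), ((1, 0, 1), 0), ((1, 0, 0), 1),
     ((0, 1, 1), 1), ((0, 1, 0), 1), ((0, 0, 1), 1), ((0, 0, 0), 0)]

-- indices (i±1) % n and i are provably in range for 0 ≤ i < n, and the RULE_30 key is always
-- present for 0/1 cells, so the total forms pyGetD / Dict.getD are exact here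
def evolve_rule30 (row : List Int) : List Int :=
  let n : Int := (row.length : Int)
  (PySem.List.pyRange 0 n 1).foldl
    (fun new_row i =>
      let left := PySem.List.pyGetD row (PySem.Int.mod (i - 1) n) 0
      let center := PySem.List.pyGetD row i 0
      let right := PySem.List.pyGetD row (PySem.Int.mod (i + 1) n) 0
      PySem.List.pySetD new_row i (RULE_30.getD (left, center, right) 0))
    (List.replicate row.length (0 : Int))

def aLoop (center : Int) (fuel : Nat) (row : List Int) : List Int :=
  match fuel with
  | 0 => []
  | f + 1 =>
    let row' := evolve_rule30 row
    PySem.List.pyGetD row' center 0 :: aLoop center f row'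

def get_center_sequence (width : Int) (steps : Int) : List Int :=
  -- row[width // 2] = 1 raises IndexError for width ≤ 0: excluded by Pre_
  let row := PySem.List.pySetD (List.replicate width.toNat (0 : Int)) (PySem.Int.floordiv width 2) 1
  let center := PySem.Int.floordiv width 2
  PySem.List.pyGetD row center 0 :: aLoop center (steps - 1).toNat row

-- ===== PORT B =====
-- Python's row integer is nonnegative throughout (it is always < 2^width), so it is
-- represented as a Nat; each line below is the corresponding line of Source B's loop body.
def altStep (width : Nat) (row : Nat) : Nat :=
  let mask := (1 <<< width) - 1
  let left := ((row <<< 1) ||| (row >>> (width - 1))) &&& mask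
  let right := ((row >>> 1) ||| ((row &&& 1) <<< (width - 1))) &&& mask
  left ^^^ (row ||| right)

def altLoop (width c : Nat) (fuel : Nat) (row : Nat) : List Int :=
  match fuel with
  | 0 => []
  | f + 1 =>
    let row' := altStep width row
    (((row' >>> c) &&& 1 : Nat) : Int) :: altLoop width c f row'

def get_center_sequence_alt (width : Int) (steps : Int) : List Int :=
  let w := width.toNat
  let c := w / 2
  let row := 1 <<< c
  (((row >>> c) &&& 1 : Nat) : Int) :: altLoop w c (steps - 1).toNat row

-- ===== PRECONDITION & SPEC =====
-- Pre_ excludes exactly width ≤ 0, where Python A raises IndexError (row[width//2] on an empty row)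
def Pre_get_center_sequence (width : Int) (steps : Int) : Prop := 1 ≤ width
instance (width : Int) (steps : Int) : Decidable (Pre_get_center_sequence width steps) := by
  unfold Pre_get_center_sequence; infer_instance
def pvWitness_get_center_sequence : Int × Int := (5, 4)

def Spec_get_center_sequence (width : Int) (steps : Int) (out : List Int) : Prop := out = get_center_sequence_alt width steps
instance (width : Int) (steps : Int) (out : List Int) : Decidable (Spec_get_center_sequence width steps out) := by unfold Spec_get_center_sequence; infer_instance

-- ===== CLAIM (what is proved, stated in full; the proofs are below) =====
def Claim_equal_get_center_sequence : Prop := ∀ (width : Int) (steps : Int), Dom_get_center_sequence width steps → Pre_get_center_sequence width steps → Spec_get_center_sequence width steps (get_center_sequence width steps)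

-- ===== LEMMAS AND PROOFS =====

-- 0/1 value of a bit
def bitv (b : Bool) : Int := if b then 1 else 0

-- the invariant relating A's list row to B's bitboard row
def RowRel (w : Nat) (l : List Int) (r : Nat) : Prop :=
  l.length = w ∧ r < 2 ^ w ∧ ∀ i : Nat, i < w → l[i]? = some (bitv (r.testBit i))

lemma shiftand_eq_bitv (r c : Nat) : (((r >>> c) &&& 1 : Nat) : Int) = bitv (r.testBit c) := by
  rw [Nat.and_one_is_mod, Nat.testBit, Nat.one_and_eq_mod_two]
  rcases Nat.mod_two_eq_zero_or_one (r >>> c) with h | h <;> simp [h, bitv]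

-- A's cell update as a function of the old row
def cellA (row : List Int) (i : Int) : Int :=
  RULE_30.getD
    (PySem.List.pyGetD row (PySem.Int.mod (i - 1) (row.length : Int)) 0,
     PySem.List.pyGetD row i 0,
     PySem.List.pyGetD row (PySem.Int.mod (i + 1) (row.length : Int)) 0) 0

lemma foldl_set_range (g : Nat → Int) :
    ∀ (n : Nat) (init : List Int), n ≤ init.length →
      (List.range n).foldl (fun acc k => acc.set k (g k)) init
        = (List.range n).map g ++ init.drop n := by
  intro n
  induction n with
  | zero => simp
  | succ m ih =>
    intro init hlen
    rw [List.range_succ, List.foldl_append, List.map_append, ih init (by omega)]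
    have hd : init.drop m = init[m] :: init.drop (m + 1) :=
      List.drop_eq_getElem_cons (by omega)
    simp only [List.foldl_cons, List.foldl_nil, hd]
    rw [List.set_append_right _ _ (by simp)]
    simp only [List.length_map, List.length_range, Nat.sub_self]
    rw [List.set_cons_zero]
    simp

lemma evolve_eq_map (row : List Int) :
    evolve_rule30 row = (List.range row.length).map (fun k : Nat => cellA row (k : Int)) := by
  simp only [evolve_rule30]
  rw [PySem.List.pyRange_zero_natCast, List.foldl_map]
  simp only [PySem.List.pySetD_natCast]
  change (List.range row.length).foldl (fun acc k => acc.set k (cellA row (k : Int)))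
    (List.replicate row.length (0 : Int)) = _
  rw [foldl_set_range (fun k => cellA row (k : Int)) row.length
    (List.replicate row.length (0 : Int)) (by simp), List.drop_replicate]
  simp only [Nat.sub_self, List.replicate_zero, List.append_nil]

lemma rule_lookup (a b c : Bool) :
    RULE_30.getD (bitv a, bitv b, bitv c) 0 = bitv (xor a (b || c)) := by
  cases a <;> cases b <;> cases c <;> decide

lemma testBit_high {w r j : Nat} (hr : r < 2 ^ w) (hj : w ≤ j) : r.testBit j = false :=
  Nat.testBit_eq_false_of_lt (lt_of_lt_of_le hr (Nat.pow_le_pow_right (by norm_num) hj))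

lemma altStep_lt {w r : Nat} (hr : r < 2 ^ w) : altStep w r < 2 ^ w := by
  unfold altStep
  have hm : (1 <<< w) - 1 < 2 ^ w := by simp [Nat.one_shiftLeft]
  apply Nat.xor_lt_two_pow (lt_of_le_of_lt Nat.and_le_right hm)
  exact Nat.or_lt_two_pow hr (lt_of_le_of_lt Nat.and_le_right hm)

lemma altStep_testBit {w r : Nat} (hw : 1 ≤ w) (hr : r < 2 ^ w) {i : Nat} (hi : i < w) :
    (altStep w r).testBit i
      = xor (r.testBit ((i + w - 1) % w)) (r.testBit i || r.testBit ((i + 1) % w)) := by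
  unfold altStep
  simp only [Nat.testBit_xor, Nat.testBit_or, Nat.testBit_and, Nat.one_shiftLeft,
    Nat.testBit_two_pow_sub_one, Nat.testBit_shiftLeft, Nat.testBit_shiftRight, hi,
    decide_true, Bool.and_true]
  rcases Nat.eq_zero_or_pos i with hi0 | hipos
  · subst hi0
    have h1 : (0 + w - 1) % w = w - 1 := by
      rw [Nat.zero_add]; exact Nat.mod_eq_of_lt (by omega)
    rcases Nat.eq_or_lt_of_le hw with hw1 | hw2
    · have h2 : (0 + 1) % w = 0 := by rw [← hw1]
      have h6 : r.testBit 1 = false := testBit_high hr (by omega)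
      rw [h1, h2, ← hw1]
      simp only [show (1 : Nat) - 1 = 0 from rfl, Nat.zero_add, Nat.shiftRight_zero,
        Nat.shiftLeft_zero, h6, Nat.testBit_and]
      have h3 : ¬ (1 ≤ 0) := by omega
      cases h0 : r.testBit 0 <;> simp [h3, h0]
    · have h2 : (0 + 1) % w = 1 := Nat.mod_eq_of_lt (by omega)
      have h3 : ¬ (1 ≤ 0) := by omega
      have h4 : ¬ (w - 1 ≤ 0) := by omega
      rw [h1, h2]
      simp [h3, h4, Nat.add_comm, Nat.add_zero]
  · rcases Nat.lt_or_ge i (w - 1) with hlt | hge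
    · have h1 : (i + w - 1) % w = i - 1 := by
        have he : i + w - 1 = (i - 1) + w := by omega
        rw [he, Nat.add_mod_right, Nat.mod_eq_of_lt (by omega)]
      have h2 : (i + 1) % w = i + 1 := Nat.mod_eq_of_lt (by omega)
      have h4 : r.testBit (w - 1 + i) = false := testBit_high hr (by omega)
      have h5 : ¬ (w - 1 ≤ i) := by omega
      have h6 : (1 : Nat) ≤ i := hipos
      rw [h1, h2]
      simp [h4, h5, h6, Nat.add_comm 1 i]
    · have h1 : (i + w - 1) % w = i - 1 := by
        have he : i + w - 1 = (i - 1) + w := by omega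
        rw [he, Nat.add_mod_right, Nat.mod_eq_of_lt (by omega)]
      have h2 : (i + 1) % w = 0 := by
        have he : i + 1 = w := by omega
        simp [he]
      have h4 : r.testBit (w - 1 + i) = false := testBit_high hr (by omega)
      have h6 : r.testBit (1 + i) = false := testBit_high hr (by omega)
      have h7 : (w - 1 ≤ i) := by omega
      have h8 : i - (w - 1) = 0 := by omega
      have h9 : (1 : Nat) ≤ i := hipos
      rw [h1, h2]
      simp [h4, h6, h7, h8, h9]

lemma modL {w i : Nat} (hw : 1 ≤ w) (hi : i < w) :
    PySem.Int.mod ((i : Int) - 1) (w : Int) = (((i + w - 1) % w : Nat) : Int) := by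
  rw [PySem.Int.mod_eq_emod_of_pos (by exact_mod_cast hw : (0:Int) < (w:Int))]
  have he : (i : Int) - 1 = ((i + w - 1 : Nat) : Int) - (w : Int) := by push_cast <;> omega
  rw [he, Int.sub_emod_right, Int.natCast_mod]

lemma modR {w i : Nat} (hw : 1 ≤ w) (hi : i < w) :
    PySem.Int.mod ((i : Int) + 1) (w : Int) = (((i + 1) % w : Nat) : Int) := by
  rw [PySem.Int.mod_eq_emod_of_pos (by exact_mod_cast hw : (0:Int) < (w:Int))]
  have he : (i : Int) + 1 = ((i + 1 : Nat) : Int) := by push_cast <;> omega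
  rw [he, Int.natCast_mod]

lemma getD_of_rel {w : Nat} {l : List Int} {r : Nat} (h : RowRel w l r) {j : Nat} (hj : j < w) :
    PySem.List.pyGetD l (j : Int) 0 = bitv (r.testBit j) := by
  rw [PySem.List.pyGetD_natCast, List.getD_eq_getElem?_getD, h.2.2 j hj]
  rfl

lemma step_corr {w : Nat} {l : List Int} {r : Nat} (hw : 1 ≤ w) (h : RowRel w l r) :
    RowRel w (evolve_rule30 l) (altStep w r) := by
  obtain ⟨hlen, hr, hbits⟩ := h
  refine ⟨by rw [evolve_eq_map]; simp [hlen], altStep_lt hr, ?_⟩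
  intro i hi
  rw [evolve_eq_map]
  rw [List.getElem?_map, List.getElem?_range (by omega)]
  simp only [Option.map_some]
  congr 1
  unfold cellA
  rw [hlen, modL hw hi, modR hw hi,
    getD_of_rel ⟨hlen, hr, hbits⟩ (Nat.mod_lt _ (by omega)),
    getD_of_rel ⟨hlen, hr, hbits⟩ hi,
    getD_of_rel ⟨hlen, hr, hbits⟩ (Nat.mod_lt _ (by omega)),
    rule_lookup, altStep_testBit hw hr hi]

lemma loop_corr {w : Nat} (hw : 1 ≤ w) :
    ∀ (fuel : Nat) (l : List Int) (r : Nat), RowRel w l r →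
      aLoop ((w / 2 : Nat) : Int) fuel l = altLoop w (w / 2) fuel r := by
  intro fuel
  induction fuel with
  | zero => intro l r _; rfl
  | succ f ih =>
    intro l r h
    have h' := step_corr hw h
    simp only [aLoop, altLoop]
    rw [ih _ _ h', getD_of_rel h' (Nat.div_lt_self (by omega) (by omega)),
      shiftand_eq_bitv]

lemma rel_init {w : Nat} (hw : 1 ≤ w) :
    RowRel w ((List.replicate w (0 : Int)).set (w / 2) 1) (1 <<< (w / 2)) := by
  have hc : w / 2 < w := Nat.div_lt_self (by omega) (by omega)
  refine ⟨by simp, ?_, ?_⟩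
  · rw [Nat.one_shiftLeft]
    exact Nat.pow_lt_pow_right (by omega) hc
  · intro i hi
    rw [Nat.one_shiftLeft, List.getElem?_set, Nat.testBit_two_pow]
    by_cases he : w / 2 = i <;> simp [he, hi, bitv, List.getElem?_replicate]

-- ===== VERDICT (by name: the statement is the Claim_ definition above) =====
theorem get_center_sequence_spec : Claim_equal_get_center_sequence := by
  intro width steps _ hpre
  unfold Spec_get_center_sequence
  have hwpos : (0 : Int) < width := by exact_mod_cast hpre
  have hw : 1 ≤ width.toNat := by omega
  have hcast : (width.toNat : Int) = width := Int.toNat_of_nonneg (by omega)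
  have hflo : PySem.Int.floordiv width 2 = ((width.toNat / 2 : Nat) : Int) := by
    rw [← hcast]; exact_mod_cast PySem.Int.floordiv_natCast width.toNat 2
  simp only [get_center_sequence, get_center_sequence_alt, hflo, PySem.List.pySetD_natCast,
    Int.toNat_natCast]
  have h0 := rel_init hw
  rw [loop_corr hw _ _ _ h0,
    getD_of_rel h0 (Nat.div_lt_self (by omega) (by omega)), shiftand_eq_bitv]
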